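-- pv_equiv track=rewrite | github.com/KevinChen1994/leetcode-algorithm | top100/338.py | countBits_2
-- ===== SOURCE A (Python) =====
-- def countBits_2(num):
--
--     def popcount(n):
--         count = 0
--         for i in range(n):
--             if n == 0: break
--             # -的优先级比&高
--             n &= n - 1
--             count += 1
--         return count
--     result = []
--     for i in range(num + 1):
--         result.append(popcount(i))
--     return result
-- ===== SOURCE B (Python) =====
-- def countBits_2(num):
--     # DP on the halved index: bits(i) = bits(i // 2) + (i % 2); one O(1) step per i.
--     result = []
--     for i in range(num + 1):
--         result.append(0 if i == 0 else result[i // 2] + i % 2)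
--     return result
-- ===== Notes on version B (the rewrite author's own statement) =====
-- stated objective: faster
-- what changed: replaces the per-element Kernighan popcount loop with a single-pass DP using the already-computed count at i//2 (bits(i)=bits(i//2)+i%2)
import Mathlib
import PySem

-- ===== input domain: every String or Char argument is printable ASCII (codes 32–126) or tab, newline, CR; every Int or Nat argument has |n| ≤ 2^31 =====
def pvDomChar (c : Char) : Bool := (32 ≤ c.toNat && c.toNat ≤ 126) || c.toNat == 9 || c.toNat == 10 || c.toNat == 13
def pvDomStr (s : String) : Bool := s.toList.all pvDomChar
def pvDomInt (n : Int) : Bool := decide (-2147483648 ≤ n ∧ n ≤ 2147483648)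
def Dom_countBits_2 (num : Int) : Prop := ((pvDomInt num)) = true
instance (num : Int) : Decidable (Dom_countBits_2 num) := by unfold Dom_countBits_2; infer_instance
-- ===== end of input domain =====

-- B replaces A's per-element Kernighan popcount loop by a one-pass DP reusing the count at i//2; proved to return the same list.


-- ===== PORT A =====
-- inner 'for i in range(n): if n == 0: break; n &= n - 1; count += 1'
def pvPopLoop : List Int → Int → Int → Int
  | [], _, count => count
  | _ :: rest, n, count =>
      if n = 0 then count
      else pvPopLoop rest (PySem.Int.band n (n - 1)) (count + 1)

-- def popcount(n)
def pvPopcount (n : Int) : Int := pvPopLoop (PySem.List.pyRange 0 n 1) n 0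

def countBits_2 (num : Int) : List Int :=
  (PySem.List.pyRange 0 (num + 1) 1).foldl (fun result i => result ++ [pvPopcount i]) []

-- ===== PORT B =====
-- 'result.append(0 if i == 0 else result[i // 2] + i % 2)'; the index i // 2 is always
-- in range (i // 2 < i ≤ len(result)), so the total pyGetD is exact here.
def countBits_2_alt (num : Int) : List Int :=
  (PySem.List.pyRange 0 (num + 1) 1).foldl
    (fun result i =>
      result ++ [if i = 0 then 0
                 else PySem.List.pyGetD result (PySem.Int.floordiv i 2) 0 + PySem.Int.mod i 2])
    []

-- ===== PRECONDITION & SPEC =====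
def Spec_countBits_2 (num : Int) (out : List Int) : Prop := out = countBits_2_alt num
instance (num : Int) (out : List Int) : Decidable (Spec_countBits_2 num out) := by unfold Spec_countBits_2; infer_instance

-- ===== CLAIM (what is proved, stated in full; the proofs are below) =====
def Claim_equal_countBits_2 : Prop := ∀ (num : Int), Dom_countBits_2 num → Spec_countBits_2 num (countBits_2 num)

-- ===== LEMMAS AND PROOFS =====

-- bit count of a natural number, as PySem's Python-exact bitCount
def pvNbc (n : Nat) : Nat := PySem.Int.bitCount (n : Int)

theorem pvNbc_zero : pvNbc 0 = 0 := PySem.Int.bitCount_zero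

theorem pvNbc_halve {m : Nat} (h : 0 < m) : pvNbc m = m % 2 + pvNbc (m / 2) :=
  PySem.Int.bitCount_natCast h

theorem pvNbc_two_mul (m : Nat) : pvNbc (2 * m) = pvNbc m := by
  rcases Nat.eq_zero_or_pos m with rfl | hm
  · simp
  · rw [pvNbc_halve (by omega)]
    simp [Nat.mul_div_cancel_left _ (by norm_num : 0 < 2), Nat.mul_mod_right]

theorem pvNbc_two_mul_add_one (m : Nat) : pvNbc (2 * m + 1) = pvNbc m + 1 := by
  rw [pvNbc_halve (by omega)]
  have h1 : (2 * m + 1) / 2 = m := by omega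
  have h2 : (2 * m + 1) % 2 = 1 := by omega
  rw [h1, h2]; omega

theorem pvNbc_le (n : Nat) : pvNbc n ≤ n := by
  induction n using Nat.strong_induction_on with
  | _ n ih =>
    rcases Nat.eq_zero_or_pos n with rfl | hn
    · simp [pvNbc_zero]
    · rw [pvNbc_halve hn]
      have := ih (n / 2) (Nat.div_lt_self hn (by norm_num))
      omega

-- clearing the lowest set bit decreases n
theorem pvClb_lt {n : Nat} (h : 0 < n) : n &&& (n - 1) < n :=
  lt_of_le_of_lt Nat.and_le_right (by omega)

-- n & (n-1) clears the lowest set bit: the bit count drops by exactly one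
theorem pvNbc_clb {n : Nat} (h : 0 < n) : pvNbc n = pvNbc (n &&& (n - 1)) + 1 := by
  induction n using Nat.strong_induction_on with
  | _ n ih =>
    rcases Nat.even_or_odd n with ⟨m, hm⟩ | ⟨m, hm⟩
    · -- n = 2*m, m > 0 : n-1 = bit true (m-1), n & (n-1) = 2*(m & (m-1))
      have hm' : 0 < m := by omega
      have h1 : n = Nat.bit false m := by simp [Nat.bit_val]; omega
      have h2 : n - 1 = Nat.bit true (m - 1) := by simp [Nat.bit_val]; omega
      have hland : n &&& (n - 1) = 2 * (m &&& (m - 1)) := by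
        rw [h2, h1, Nat.land_bit]; simp [Nat.bit_val]
      have ihm := ih m (by omega) hm'
      have hn2m : n = 2 * m := by omega
      rw [hland, pvNbc_two_mul, hn2m, pvNbc_two_mul, ihm]
    · -- n = 2*m+1 : n-1 = 2*m, n & (n-1) = 2*m
      have h1 : n = Nat.bit true m := by simp [Nat.bit_val]; omega
      have h2 : n - 1 = Nat.bit false m := by simp [Nat.bit_val]; omega
      have hland : n &&& (n - 1) = 2 * m := by
        rw [h2, h1, Nat.land_bit]; simp [Nat.bit_val]
      have hn : n = 2 * m + 1 := by omega
      rw [hland, pvNbc_two_mul, hn, pvNbc_two_mul_add_one]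

-- A's inner loop computes the bit count (given enough fuel)
theorem pvPopLoop_eq (l : List Int) (n c : Nat) (hl : pvNbc n ≤ l.length) :
    pvPopLoop l (n : Int) (c : Int) = ((c + pvNbc n : Nat) : Int) := by
  induction n using Nat.strong_induction_on generalizing l c with
  | _ n ih =>
    rcases Nat.eq_zero_or_pos n with rfl | hn
    · cases l <;> simp [pvPopLoop, pvNbc_zero]
    · have hstep := pvNbc_clb hn
      cases l with
      | nil => simp [hstep] at hl
      | cons x rest =>
        have hne : (n : Int) ≠ 0 := by exact_mod_cast Nat.pos_iff_ne_zero.mp hn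
        have hcast : PySem.Int.band (n : Int) ((n : Int) - 1) = ((n &&& (n - 1) : Nat) : Int) := by
          have h1 : ((n : Int) - 1) = ((n - 1 : Nat) : Int) := by omega
          rw [h1, PySem.Int.band_natCast]
        have hrest : pvNbc (n &&& (n - 1)) ≤ rest.length := by
          simp at hl; omega
        have := ih (n &&& (n - 1)) (pvClb_lt hn) rest (c + 1) hrest
        simp only [pvPopLoop, if_neg hne, hcast]
        have hc1 : (c : Int) + 1 = ((c + 1 : Nat) : Int) := by push_cast; ring
        rw [hc1, this]
        congr 1
        omega

theorem pvPopcount_eq (k : Nat) : pvPopcount (k : Int) = (pvNbc k : Int) := by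
  unfold pvPopcount
  have hlen : pvNbc k ≤ (PySem.List.pyRange 0 (k : Int) 1).length := by
    rw [PySem.List.length_pyRange_one]
    simpa using pvNbc_le k
  simpa using pvPopLoop_eq (PySem.List.pyRange 0 (k : Int) 1) k 0 hlen

-- both sides produce the table of bit counts of 0..m-1
theorem pvTable (m : Nat) :
    (PySem.List.pyRange 0 (m : Int) 1).foldl
      (fun result i =>
        result ++ [if i = 0 then 0
                   else PySem.List.pyGetD result (PySem.Int.floordiv i 2) 0 + PySem.Int.mod i 2])
      [] = (List.range m).map (fun k => (pvNbc k : Int)) := by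
  induction m with
  | zero => simp [PySem.List.pyRange_one_eq_nil]
  | succ m ih =>
    have hsplit : ((m : Nat) : Int) + 1 = (((m + 1 : Nat) : Int)) := by push_cast; ring
    rw [show (((m + 1 : Nat) : Int)) = ((m : Int) + 1) by push_cast; ring,
      PySem.List.pyRange_one_succ_right (by positivity), List.foldl_append, ih,
      List.range_succ, List.map_append]
    simp only [List.foldl_cons, List.foldl_nil, List.map_cons, List.map_nil]
    congr 1
    rcases Nat.eq_zero_or_pos m with rfl | hm
    · simp [pvNbc_zero]
    · have hne : (m : Int) ≠ 0 := by exact_mod_cast Nat.pos_iff_ne_zero.mp hm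
      have hfd : PySem.Int.floordiv (m : Int) 2 = ((m / 2 : Nat) : Int) := by
        exact_mod_cast PySem.Int.floordiv_natCast m 2
      have hmd : PySem.Int.mod (m : Int) 2 = ((m % 2 : Nat) : Int) := by
        exact_mod_cast PySem.Int.mod_natCast m 2
      have hlt : m / 2 < m := Nat.div_lt_self hm (by norm_num)
      rw [if_neg hne, hfd, hmd, PySem.List.pyGetD_natCast,
        List.getD_eq_getElem?_getD, List.getElem?_map, List.getElem?_range hlt]
      simp only [Option.map_some, Option.getD_some]
      rw [pvNbc_halve hm]
      simp only [List.cons.injEq, and_true]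
      push_cast
      omega

theorem pvA_eq_table (num : Int) :
    countBits_2 num = (List.range (num + 1).toNat).map (fun k => (pvNbc k : Int)) := by
  unfold countBits_2
  rw [PySem.List.foldl_append_singleton_eq_map, PySem.List.pyRange_one]
  simp [List.map_map, Function.comp]
  intro k _
  simpa using pvPopcount_eq k

theorem pvB_eq_table (num : Int) :
    countBits_2_alt num = (List.range (num + 1).toNat).map (fun k => (pvNbc k : Int)) := by
  unfold countBits_2_alt
  rcases le_or_gt (num + 1) 0 with h | h
  · rw [PySem.List.pyRange_one_eq_nil h]
    simp [Int.toNat_of_nonpos h]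
  · have : num + 1 = (((num + 1).toNat : Nat) : Int) := by omega
    rw [this, pvTable]
    simp only [Int.toNat_natCast]

-- ===== VERDICT (by name: the statement is the Claim_ definition above) =====
theorem countBits_2_spec : Claim_equal_countBits_2 := by
  intro num _
  unfold Spec_countBits_2
  rw [pvA_eq_table, pvB_eq_table]
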